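-- pv_equiv track=rewrite | github.com/miliar/Code_Jam_Webscraper | solutions_python/solutions_year15_round0_nr1/882.py | solve
-- ===== SOURCE A (Python) =====
-- def solve(smax, sstr):
--     friends = 0
--     up = 0
--     for k, digit in enumerate(sstr):
--         digit = int(digit)
--         if digit > 0 and up < k:
--             new_friends = k - up
--             up += new_friends
--             friends += new_friends
--         up += digit
--     return friends
-- ===== SOURCE B (Python) =====
-- def solve(smax, sstr):
--     # table-then-pass: prefix sums of the original digits, then one max over nonzero positions
--     digits = [int(c) for c in sstr]
--     prefix = []
--     s = 0
--     for d in digits: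
--         prefix.append(s)
--         s += d
--     return max((k - p for k, (d, p) in enumerate(zip(digits, prefix)) if d > 0), default=0)
-- ===== Notes on version B (the rewrite author's own statement) =====
-- stated objective: alternative
-- what changed: A maintains a self-correcting running total 'up' into which recruited friends are folded back; B instead builds the plain prefix-sum table of the original digits in one pass and then takes a single max of k - prefix[k] over the nonzero positions, with no feedback state.
import Mathlib
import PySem

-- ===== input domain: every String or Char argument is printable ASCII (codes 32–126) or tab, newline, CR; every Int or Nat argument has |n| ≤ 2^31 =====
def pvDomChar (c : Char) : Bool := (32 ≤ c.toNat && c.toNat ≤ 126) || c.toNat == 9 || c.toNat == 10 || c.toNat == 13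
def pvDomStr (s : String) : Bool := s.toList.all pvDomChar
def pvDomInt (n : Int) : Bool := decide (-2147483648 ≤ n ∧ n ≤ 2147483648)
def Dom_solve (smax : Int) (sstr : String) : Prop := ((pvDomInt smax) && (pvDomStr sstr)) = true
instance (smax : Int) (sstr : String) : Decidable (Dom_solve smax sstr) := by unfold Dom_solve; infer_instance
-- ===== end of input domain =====

-- B replaces A's self-correcting running total (recruited friends folded back into `up`) by a
-- prefix-sum table of the original digits followed by one max over the nonzero positions
-- (objective: alternative decomposition, same cost).

-- ===== PORT A =====
-- int(digit) for the one-character string; the none case (ValueError on a non-digit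
-- character) is exactly what Pre_solve excludes.
def pyIntDigit (c : Char) : Int := (PySem.Int.ofChars? [c]).getD 0

-- the 'for k, digit in enumerate(sstr)' loop, state (k, friends, up)
def solveLoopA : List Char → Int → Int → Int → Int × Int
  | [], _, friends, up => (friends, up)
  | c :: rest, k, friends, up =>
    let digit := pyIntDigit c
    if digit > 0 ∧ up < k then
      -- new_friends = k - up; up += new_friends; friends += new_friends; up += digit
      solveLoopA rest (k + 1) (friends + (k - up)) ((up + (k - up)) + digit)
    else
      solveLoopA rest (k + 1) friends (up + digit)

def solve (smax : Int) (sstr : String) : Int :=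
  (solveLoopA sstr.toList 0 0 0).1

-- ===== PORT B =====
-- the 'for d in digits: prefix.append(s); s += d' loop of Source B
def prefixLoopB : List Int → Int → List Int
  | [], _ => []
  | d :: rest, s => s :: prefixLoopB rest (s + d)

-- the comprehension '[k - p for k, (d, p) in enumerate(zip(digits, prefix)) if d > 0]'
def candsB : List (Int × Int) → Int → List Int
  | [], _ => []
  | (d, p) :: rest, k => (if d > 0 then [k - p] else []) ++ candsB rest (k + 1)

def solve_alt (smax : Int) (sstr : String) : Int :=
  let digits := sstr.toList.map pyIntDigit
  let pfx := prefixLoopB digits 0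
  PySem.List.maxD (candsB (digits.zip pfx) 0) (fun x => x) 0

-- ===== PRECONDITION & SPEC =====
-- Pre_: every character of sstr is a decimal digit — on any other character int(digit)
-- raises ValueError in A (the empty string is allowed; A returns 0 there).
def Pre_solve (smax : Int) (sstr : String) : Prop := sstr.toList.all Char.isDigit = true
instance (smax : Int) (sstr : String) : Decidable (Pre_solve smax sstr) := by unfold Pre_solve; infer_instance

def pvWitness_solve : Int × String := (4, "11001")

def Spec_solve (smax : Int) (sstr : String) (out : Int) : Prop := out = solve_alt smax sstr
instance (smax : Int) (sstr : String) (out : Int) : Decidable (Spec_solve smax sstr out) := by unfold Spec_solve; infer_instance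

-- ===== CLAIM (what is proved, stated in full; the proofs are below) =====
def Claim_equal_solve : Prop := ∀ (smax : Int) (sstr : String), Dom_solve smax sstr → Pre_solve smax sstr → Spec_solve smax sstr (solve smax sstr)

-- ===== LEMMAS AND PROOFS =====

-- a digit character's int() value, and its nonnegativity
theorem pyIntDigit_of_digit (c : Char) (hc : c.isDigit = true) :
    pyIntDigit c = (c.toNat : Int) - 48 ∧ 0 ≤ pyIntDigit c := by
  simp [Char.isDigit] at hc
  obtain ⟨ha, hb⟩ := hc
  have ha' : 48 ≤ c.toNat := UInt32.le_iff_toNat_le.mp ha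
  have hb' : c.toNat ≤ 57 := UInt32.le_iff_toNat_le.mp hb
  have h2 := Char.ofNat_toNat c
  set n := c.toNat with hn
  interval_cases n <;> (rw [← h2]; constructor <;> decide)

-- main invariant: A's loop from state (friends = f, up = s + f) computes the running max,
-- over B's candidate list built from the prefix table started at s, with seed f
theorem loopA_eq_foldl_max (l : List Char) :
    ∀ (k f u s : Int), u = s + f →
      (solveLoopA l k f u).1 =
        (candsB ((l.map pyIntDigit).zip (prefixLoopB (l.map pyIntDigit) s)) k).foldl max f := by
  induction l with
  | nil => intro k f u s _; simp [solveLoopA, prefixLoopB, candsB]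
  | cons c rest ih =>
    intro k f u s hu
    simp only [solveLoopA, List.map_cons, prefixLoopB, List.zip_cons_cons, candsB]
    by_cases hd : pyIntDigit c > 0
    · by_cases hk : u < k
      · rw [if_pos ⟨hd, hk⟩, if_pos hd]
        rw [ih (k + 1) (f + (k - u)) ((u + (k - u)) + pyIntDigit c) (s + pyIntDigit c) (by omega)]
        simp only [List.singleton_append, List.foldl_cons]
        have : max f (k - s) = f + (k - u) := by
          rw [max_eq_right (by omega)]; omega
        rw [this]
      · rw [if_neg (by tauto), if_pos hd]
        rw [ih (k + 1) f (u + pyIntDigit c) (s + pyIntDigit c) (by omega)]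
        simp only [List.singleton_append, List.foldl_cons]
        rw [max_eq_left (by omega)]
    · rw [if_neg (by tauto), if_neg hd]
      rw [ih (k + 1) f (u + pyIntDigit c) (s + pyIntDigit c) (by omega)]
      simp

-- on an all-digit string, the head of the candidate list (if any) is nonnegative:
-- the first nonzero digit at position k' has a prefix sum of zeros started at s ≤ k'
theorem candsB_head_nonneg (l : List Char) :
    ∀ (k s : Int), (∀ c ∈ l, c.isDigit = true) → s ≤ k →
      ∀ h t, candsB ((l.map pyIntDigit).zip (prefixLoopB (l.map pyIntDigit) s)) k = h :: t → 0 ≤ h := by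
  induction l with
  | nil => intro k s _ _ h t hcontra; simp [candsB, prefixLoopB] at hcontra
  | cons c rest ih =>
    intro k s hdig hsk h t heq
    have hc := pyIntDigit_of_digit c (hdig c (List.mem_cons_self))
    simp only [List.map_cons, prefixLoopB, List.zip_cons_cons, candsB] at heq
    by_cases hd : pyIntDigit c > 0
    · rw [if_pos hd] at heq
      simp only [List.singleton_append, List.cons.injEq] at heq
      omega
    · rw [if_neg hd] at heq
      simp only [List.nil_append] at heq
      exact ih (k + 1) (s + pyIntDigit c) (fun c' hc' => hdig c' (List.mem_cons_of_mem c hc'))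
        (by omega) h t heq

-- ===== VERDICT (by name: the statement is the Claim_ definition above) =====
theorem solve_spec : Claim_equal_solve := by
  intro smax sstr _ hpre
  unfold Spec_solve solve solve_alt
  unfold Pre_solve at hpre
  simp only [List.all_eq_true] at hpre
  rw [loopA_eq_foldl_max sstr.toList 0 0 0 0 (by ring)]
  cases hcs : candsB ((sstr.toList.map pyIntDigit).zip (prefixLoopB (sstr.toList.map pyIntDigit) 0)) 0 with
  | nil =>
    show _ = PySem.List.maxD (candsB ((List.map pyIntDigit sstr.toList).zip (prefixLoopB (List.map pyIntDigit sstr.toList) 0)) 0) (fun x => x) 0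
    rw [hcs]; simp [PySem.List.maxD, PySem.List.max?]
  | cons h t =>
    have h0 : 0 ≤ h :=
      candsB_head_nonneg sstr.toList 0 0 (fun c hc => hpre c hc) le_rfl h t hcs
    show _ = PySem.List.maxD (candsB ((List.map pyIntDigit sstr.toList).zip (prefixLoopB (List.map pyIntDigit sstr.toList) 0)) 0) (fun x => x) 0
    rw [hcs]
    simp only [PySem.List.maxD, PySem.List.max?_id_cons, Option.getD_some, List.foldl_cons]
    rw [max_eq_right h0]
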